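-- pv_equiv track=rewrite | github.com/somm12/codingTest | 67주차/가장많이받은선물.py | solution
-- ===== SOURCE A (Python) =====
-- def combi(n):
--     ans = []
--     def dfs(start,res):
--         if len(res) == 2:
--             ans.append(res)
--             return
--         for i in range(start,n):
--             dfs(i+1,res+[i])
--     dfs(0,[])
--     return ans
--
-- def solution(friends, gifts):
--     name = {}
--     n = len(friends)
--     arr = [[0]*n for _ in range(n)]
--     giftNum = {}# 선물 지수
--     get = [0]*n # 최종적으로 받을 선물 개수
--
--     for i,v in enumerate(friends):
--         name[v] = i
--
--
--     for v in gifts: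
--         a,b = v.split(" ")
--         idx1 = name[a]
--         idx2 = name[b]
--         arr[idx1][idx2] += 1
--
--
--     #선물지수 구하기
--     for j in range(n):
--         total = 0
--         for i in range(n):# 받은 것.
--             total += arr[i][j]
--         giftNum[j] = (sum(arr[j]) - total)
--
--
--
--     combination = combi(n)
--
--
--     for idx1,idx2 in combination:
--         v1 = arr[idx1][idx2]
--         v2 = arr[idx2][idx1]
--         if (v1 > 0 or v2 > 0) and v1!= v2:# 기록이 있고, 값이 서로 다르면.
--             if v1> v2:
--                 get[idx1] += 1
--             else:
--                 get[idx2] += 1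
--         else:# 선물지수 비교.
--             if giftNum[idx1] > giftNum[idx2]:
--                 get[idx1] += 1
--             elif giftNum[idx2] > giftNum[idx1]:
--                 get[idx2] += 1
--
--
--     return max(get)
-- ===== SOURCE B (Python) =====
-- def solution(friends, gifts):
--     # Sort-based ranking: a friend's base score is the number of friends with a
--     # strictly smaller gift index (computed by sorting the gift indices once),
--     # then only the pairs that actually exchanged gifts are visited to replace
--     # the gift-index verdict by the head-to-head verdict where the directed
--     # counts differ.  O(n log n + g) instead of A's O(n^2 + g).
--     n = len(friends)
--     name = {v: i for i, v in enumerate(friends)}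
--     d = {}
--     gidx = [0] * n
--     for g in gifts:
--         a, b = g.split(" ")
--         i, j = name[a], name[b]
--         d[(i, j)] = d.get((i, j), 0) + 1
--         gidx[i] += 1
--         gidx[j] -= 1
--     first = {}
--     for r, v in enumerate(sorted(gidx)):
--         if v not in first:
--             first[v] = r
--     wins = [first[v] for v in gidx]
--     for (i, j) in d:
--         if i == j or (i > j and (j, i) in d):
--             continue
--         lo, hi = (i, j) if i < j else (j, i)
--         v1 = d.get((lo, hi), 0)
--         v2 = d.get((hi, lo), 0)
--         if v1 != v2:
--             if v1 > v2:
--                 wins[lo] += 1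
--             else:
--                 wins[hi] += 1
--             if gidx[lo] > gidx[hi]:
--                 wins[lo] -= 1
--             elif gidx[hi] > gidx[lo]:
--                 wins[hi] -= 1
--     return max(wins)
-- ===== Notes on version B (the rewrite author's own statement) =====
-- stated objective: faster
-- what changed: Replaces A's n-by-n matrix, its O(n^2) column-summing gift-index pass and its O(n^2) loop over all recursive-dfs-built pairs by a sort-based ranking: each friend's base score is the number of friends with strictly smaller gift index (first-occurrence index in the sorted gift-index list), and only the pairs that actually exchanged gifts are then visited to swap the gift-index verdict for the head-to-head verdict where the directed counts differ.
import Mathlib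
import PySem

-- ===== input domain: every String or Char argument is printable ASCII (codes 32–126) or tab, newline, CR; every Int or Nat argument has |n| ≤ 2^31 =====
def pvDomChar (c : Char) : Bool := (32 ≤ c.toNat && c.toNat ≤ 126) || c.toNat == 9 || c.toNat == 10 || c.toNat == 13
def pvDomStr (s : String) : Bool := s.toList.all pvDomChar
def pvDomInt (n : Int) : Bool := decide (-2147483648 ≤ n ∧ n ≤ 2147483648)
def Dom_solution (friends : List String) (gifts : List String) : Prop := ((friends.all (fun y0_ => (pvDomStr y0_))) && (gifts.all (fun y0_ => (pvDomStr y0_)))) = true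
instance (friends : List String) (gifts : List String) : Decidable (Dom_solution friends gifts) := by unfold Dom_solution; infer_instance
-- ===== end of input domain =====

-- B replaces A's n×n matrix, O(n^2) column-summing gift-index pass and O(n^2) loop over dfs-built
-- pairs by a sort-based ranking (base score = number of friends with strictly smaller gift index)
-- plus a pass over only the actually-exchanged pairs; same results on Pre_ (A raises on empty
-- friends or malformed gifts).


-- ===== PORT A =====
-- arr[i][j] read (both indices are in range wherever A reads the matrix)
def pvEntry (m : List (List Int)) (i j : Int) : Int :=
  PySem.List.pyGetD (PySem.List.pyGetD m i []) j 0

-- the inner dfs of combi; fuel 3 only makes the (depth ≤ 3) Python recursion structural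
def pvDfs (n : Int) : Nat → Int → List Int → List (List Int)
  | 0, _, _ => []
  | fuel+1, start, res =>
    if res.length == 2 then [res]
    else (PySem.List.pyRange start n).foldl
      (fun ans i => ans ++ pvDfs n fuel (i+1) (res ++ [i])) []

def pvCombi (n : Int) : List (List Int) := pvDfs n 3 0 []

def solution (friends : List String) (gifts : List String) : Int :=
  let name : PySem.Dict String Int :=
    (PySem.List.enumerate friends).foldl (fun d p => d.insert p.2 p.1) PySem.Dict.empty
  let n := friends.length
  let arr : List (List Int) := List.replicate n (List.replicate n 0)
  let arr := gifts.foldl (fun arr v =>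
      let parts := (PySem.Str.split? v " ").getD []
      let idx1 := (name.get? (PySem.List.pyGetD parts 0 "")).getD 0
      let idx2 := (name.get? (PySem.List.pyGetD parts 1 "")).getD 0
      arr.modify idx1.toNat (fun row => row.modify idx2.toNat (· + 1))) arr
  let giftNum : PySem.Dict Int Int :=
    (PySem.List.pyRange 0 (n : Int)).foldl (fun g j =>
      let total := (PySem.List.pyRange 0 (n : Int)).foldl (fun t i => t + pvEntry arr i j) 0
      g.insert j ((PySem.List.pyGetD arr j []).sum - total)) PySem.Dict.empty
  let combination := pvCombi (n : Int)
  let get : List Int := List.replicate n 0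
  let get := combination.foldl (fun get pair =>
      let idx1 := PySem.List.pyGetD pair 0 0
      let idx2 := PySem.List.pyGetD pair 1 0
      let v1 := pvEntry arr idx1 idx2
      let v2 := pvEntry arr idx2 idx1
      if (v1 > 0 ∨ v2 > 0) ∧ v1 ≠ v2 then
        (if v1 > v2 then get.modify idx1.toNat (· + 1) else get.modify idx2.toNat (· + 1))
      else if giftNum.getD idx1 0 > giftNum.getD idx2 0 then get.modify idx1.toNat (· + 1)
      else if giftNum.getD idx2 0 > giftNum.getD idx1 0 then get.modify idx2.toNat (· + 1)
      else get) get
  (PySem.List.max? get (fun x => x)).getD 0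

-- ===== PORT B =====
-- list writes gidx[i] += 1 / wins[lo] += 1 use .modify at .toNat: exact, the indices are
-- nonnegative in-range ints; first[v] is read with getD (v is always a key when read).
def solution_alt (friends : List String) (gifts : List String) : Int :=
  let n := friends.length
  let name : PySem.Dict String Int :=
    (PySem.List.enumerate friends).foldl (fun d p => d.insert p.2 p.1) PySem.Dict.empty
  let st := gifts.foldl
      (fun (s : PySem.Dict (Int × Int) Int × List Int) g =>
        let parts := (PySem.Str.split? g " ").getD []
        let i := (name.get? (PySem.List.pyGetD parts 0 "")).getD 0
        let j := (name.get? (PySem.List.pyGetD parts 1 "")).getD 0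
        (s.1.insert (i, j) (s.1.getD (i, j) 0 + 1),
         (s.2.modify i.toNat (· + 1)).modify j.toNat (fun x => x - 1)))
      (PySem.Dict.empty, List.replicate n 0)
  let d := st.1
  let gidx := st.2
  let first : PySem.Dict Int Int :=
    (PySem.List.enumerate (PySem.List.sorted gidx (fun x => x) false)).foldl
      (fun f p => if f.contains p.2 then f else f.insert p.2 p.1) PySem.Dict.empty
  let wins : List Int := gidx.map (fun v => first.getD v 0)
  let wins := d.keys.foldl (fun wins p =>
      if p.1 == p.2 || (decide (p.2 < p.1) && d.contains (p.2, p.1)) then wins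
      else
        let lo := if p.1 < p.2 then p.1 else p.2
        let hi := if p.1 < p.2 then p.2 else p.1
        let v1 := d.getD (lo, hi) 0
        let v2 := d.getD (hi, lo) 0
        if v1 ≠ v2 then
          let wins := if v1 > v2 then wins.modify lo.toNat (· + 1) else wins.modify hi.toNat (· + 1)
          if PySem.List.pyGetD gidx lo 0 > PySem.List.pyGetD gidx hi 0 then
            wins.modify lo.toNat (fun x => x - 1)
          else if PySem.List.pyGetD gidx hi 0 > PySem.List.pyGetD gidx lo 0 then
            wins.modify hi.toNat (fun x => x - 1)
          else wins
        else wins) wins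
  (PySem.List.max? wins (fun x => x)).getD 0

-- ===== PRECONDITION & SPEC =====
-- Pre_ excludes exactly the inputs on which the Python A raises: empty friends (max of an empty
-- list, ValueError), a gift that does not split on " " into exactly two tokens (unpacking error),
-- and a gift naming someone outside friends (KeyError).
def Pre_solution (friends : List String) (gifts : List String) : Prop :=
  friends ≠ [] ∧ ∀ g ∈ gifts,
    ((PySem.Str.split? g " ").getD []).length = 2 ∧
    ∀ t ∈ (PySem.Str.split? g " ").getD [], t ∈ friends
instance (friends : List String) (gifts : List String) : Decidable (Pre_solution friends gifts) := by
  unfold Pre_solution; infer_instance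
def pvWitness_solution : List String × List String := (["a", "b"], ["a b", "b a", "a b"])

def Spec_solution (friends : List String) (gifts : List String) (out : Int) : Prop := out = solution_alt friends gifts
instance (friends : List String) (gifts : List String) (out : Int) : Decidable (Spec_solution friends gifts out) := by unfold Spec_solution; infer_instance

-- ===== CLAIM (what is proved, stated in full; the proofs are below) =====
def Claim_equal_solution : Prop := ∀ (friends : List String) (gifts : List String), Dom_solution friends gifts → Pre_solution friends gifts → Spec_solution friends gifts (solution friends gifts)

-- ===== LEMMAS AND PROOFS =====

-- the name dict both programs build, and the per-gift index pair both programs compute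
def pvName (friends : List String) : PySem.Dict String Int :=
  (PySem.List.enumerate friends).foldl (fun d p => d.insert p.2 p.1) PySem.Dict.empty

def pvPOf (name : PySem.Dict String Int) (v : String) : Int × Int :=
  ((name.get? (PySem.List.pyGetD ((PySem.Str.split? v " ").getD []) 0 "")).getD 0,
   (name.get? (PySem.List.pyGetD ((PySem.Str.split? v " ").getD []) 1 "")).getD 0)

def pvPs (friends gifts : List String) : List (Int × Int) := gifts.map (pvPOf (pvName friends))

-- A's matrix update for one gift
def pvMUpd (m : List (List Int)) (p : Int × Int) : List (List Int) :=
  m.modify p.1.toNat (fun row => row.modify p.2.toNat (· + 1))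

-- the per-pair tally step of A, phrased on directed pair counts
def pvStep (ps : List (Int × Int)) (i j : Int) (get : List Int) : List Int :=
  let v1 := (ps.count (i, j) : Int)
  let v2 := (ps.count (j, i) : Int)
  if (v1 > 0 ∨ v2 > 0) ∧ v1 ≠ v2 then
    (if v1 > v2 then get.modify i.toNat (· + 1) else get.modify j.toNat (· + 1))
  else
    let g1 := ((ps.map Prod.fst).count i : Int) - ((ps.map Prod.snd).count i : Int)
    let g2 := ((ps.map Prod.fst).count j : Int) - ((ps.map Prod.snd).count j : Int)
    if g1 > g2 then get.modify i.toNat (· + 1)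
    else if g2 > g1 then get.modify j.toNat (· + 1)
    else get

-- the normal form of A
def pvCommon (friends : List String) (gifts : List String) : Int :=
  let n := friends.length
  let ps := gifts.map (pvPOf (pvName friends))
  let get := (PySem.List.pyRange 0 (n : Int)).foldl (fun get i =>
      (PySem.List.pyRange (i+1) (n : Int)).foldl (fun get j => pvStep ps i j get) get)
      (List.replicate n 0)
  (PySem.List.max? get (fun x => x)).getD 0

-- directed count, gift index, and the verdict of one unordered pair
def pvC (ps : List (Int × Int)) (p : Int × Int) : Int := (ps.count p : Int)

def pvG (ps : List (Int × Int)) (i : Int) : Int :=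
  ((ps.map Prod.fst).count i : Int) - ((ps.map Prod.snd).count i : Int)

def pvWin (ps : List (Int × Int)) (i j : Int) : Option Int :=
  if pvC ps (i, j) ≠ pvC ps (j, i) then some (if pvC ps (i, j) > pvC ps (j, i) then i else j)
  else if pvG ps i > pvG ps j then some i
  else if pvG ps j > pvG ps i then some j
  else none

def pvDelta (ps : List (Int × Int)) (k : Int) (p : Int × Int) : Int :=
  if pvWin ps p.1 p.2 = some k then 1 else 0

def pvGPick (ps : List (Int × Int)) (k i j : Int) : Int :=
  (if i = k ∧ pvG ps j < pvG ps i then 1 else 0) + (if j = k ∧ pvG ps i < pvG ps j then 1 else 0)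

def pvAdj (ps : List (Int × Int)) (k : Int) (p : Int × Int) : Int :=
  if pvC ps p ≠ pvC ps (p.2, p.1) then
    (if (if pvC ps p > pvC ps (p.2, p.1) then p.1 else p.2) = k then 1 else 0)
      - pvGPick ps k p.1 p.2
  else 0

def pvCanon (x : Int × Int) : Int × Int := if x.1 < x.2 then x else (x.2, x.1)

def pvKeepB (ps : List (Int × Int)) (x : Int × Int) : Bool :=
  !(x.1 == x.2 || (decide (x.2 < x.1) && ps.contains (x.2, x.1)))

def pvAllPairs (n : Nat) : List (Int × Int) :=
  (PySem.List.pyRange 0 (n : Int)).flatMap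
    (fun i => (PySem.List.pyRange (i+1) (n : Int)).map (fun j => (i, j)))

-- ---- name-dict facts ----
theorem pvFoldGet (L : List (Int × String)) (d : PySem.Dict String Int) (s : String) (k : Int)
    (h : (L.foldl (fun d p => d.insert p.2 p.1) d).get? s = some k) :
    (∃ p ∈ L, p.1 = k) ∨ d.get? s = some k := by
  induction L generalizing d with
  | nil => exact Or.inr h
  | cons p L ih =>
    simp only [List.foldl_cons] at h
    rcases ih _ h with h' | h'
    · obtain ⟨q, hq, hk⟩ := h'
      exact Or.inl ⟨q, List.mem_cons_of_mem _ hq, hk⟩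
    · rw [PySem.Dict.get?_insert] at h'
      split at h'
      · exact Or.inl ⟨p, List.mem_cons_self, by injection h'⟩
      · exact Or.inr h'

theorem pvFoldSome (L : List (Int × String)) (d : PySem.Dict String Int) (s : String)
    (h : s ∈ L.map (·.2) ∨ ((d.get? s).isSome : Prop)) :
    ((L.foldl (fun d p => d.insert p.2 p.1) d).get? s).isSome := by
  induction L generalizing d with
  | nil => simpa using h.resolve_left (by simp)
  | cons p L ih =>
    simp only [List.foldl_cons]
    apply ih
    rcases h with h | h
    · simp only [List.map_cons, List.mem_cons] at h
      rcases h with h | h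
      · right; rw [PySem.Dict.get?_insert]; simp [h]
      · left; exact h
    · rw [PySem.Dict.get?_insert]
      by_cases hs : s = p.2 <;> simp [hs, h]

theorem pvName_get?_range (friends : List String) (s : String) (k : Int)
    (h : (pvName friends).get? s = some k) : 0 ≤ k ∧ k < (friends.length : Int) := by
  rcases pvFoldGet _ _ _ _ h with h' | h'
  · obtain ⟨p, hp, hk⟩ := h'
    rw [PySem.List.mem_enumerate_iff] at hp
    obtain ⟨q, hq, rfl⟩ := hp
    simp at hk
    omega
  · simp [PySem.Dict.get?_empty] at h'

theorem pvName_get?_isSome (friends : List String) (s : String) (h : s ∈ friends) :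
    (((pvName friends).get? s).isSome : Prop) := by
  apply pvFoldSome
  left
  rw [PySem.List.map_snd_enumerate]
  exact h

-- every index pair computed from a well-formed gift list is in range
theorem pvPs_range (friends gifts : List String) (hpre : Pre_solution friends gifts) :
    ∀ p ∈ pvPs friends gifts,
      0 ≤ p.1 ∧ p.1 < (friends.length : Int) ∧ 0 ≤ p.2 ∧ p.2 < (friends.length : Int) := by
  obtain ⟨-, hg⟩ := hpre
  intro p hp
  rw [pvPs] at hp
  obtain ⟨v, hv, rfl⟩ := List.mem_map.mp hp
  obtain ⟨hlen, htok⟩ := hg v hv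
  obtain ⟨a, b, hab⟩ := List.length_eq_two.mp hlen
  have ha : a ∈ friends := htok a (by rw [hab]; exact List.mem_cons_self)
  have hb : b ∈ friends := htok b (by rw [hab]; simp)
  have hsa := pvName_get?_isSome friends a ha
  have hsb := pvName_get?_isSome friends b hb
  obtain ⟨ka, hka⟩ := Option.isSome_iff_exists.mp hsa
  obtain ⟨kb, hkb⟩ := Option.isSome_iff_exists.mp hsb
  have hra := pvName_get?_range friends a ka hka
  have hrb := pvName_get?_range friends b kb hkb
  simp only [pvPOf, hab, PySem.List.pyGetD_ofNat', List.getD_cons_zero,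
    List.getD_cons_succ, hka, hkb, Option.getD_some]
  exact ⟨hra.1, hra.2, hrb.1, hrb.2⟩

-- ---- matrix facts (A side) ----
theorem pvSum_modify_add_one (l : List Int) (k : Nat) (hk : k < l.length) :
    (l.modify k (· + 1)).sum = l.sum + 1 := by
  induction l generalizing k with
  | nil => simp at hk
  | cons x l ih =>
    cases k with
    | zero => simp [List.modify]; ring
    | succ k =>
      simp only [List.modify_succ_cons, List.sum_cons, ih k (by simpa using hk)]
      ring

theorem pvShape_upd (n : Nat) (m : List (List Int)) (p : Int × Int)
    (hm : m.length = n ∧ ∀ q : Nat, (h : q < m.length) → m[q].length = n) :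
    (pvMUpd m p).length = n ∧ ∀ q : Nat, (h : q < (pvMUpd m p).length) → (pvMUpd m p)[q].length = n := by
  obtain ⟨h1, h2⟩ := hm
  refine ⟨by simp [pvMUpd, h1], ?_⟩
  intro q hq
  simp only [pvMUpd] at hq ⊢
  rw [List.getElem_modify]
  split <;> simp [h2 q (by simpa using hq)]

theorem pvEntry_upd (n : Nat) (m : List (List Int)) (p : Int × Int) (i j : Int)
    (hm : m.length = n ∧ ∀ q : Nat, (h : q < m.length) → m[q].length = n)
    (hp : 0 ≤ p.1 ∧ p.1 < (n : Int) ∧ 0 ≤ p.2 ∧ p.2 < (n : Int))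
    (hi : 0 ≤ i ∧ i < (n : Int)) (hj : 0 ≤ j ∧ j < (n : Int)) :
    pvEntry (pvMUpd m p) i j = pvEntry m i j + if p = (i, j) then 1 else 0 := by
  obtain ⟨h1, h2⟩ := hm
  have hiN : i.toNat < m.length := by omega
  simp only [pvEntry]
  rw [PySem.List.pyGetD_eq_getElem m (d := []) hi.1 (by omega),
      PySem.List.pyGetD_eq_getElem (pvMUpd m p) (d := []) hi.1 (by simp [pvMUpd, h1]; omega)]
  simp only [pvMUpd]
  rw [List.getElem_modify]
  have hrow : m[i.toNat].length = n := h2 _ hiN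
  by_cases hpi : p.1 = i
  · have : p.1.toNat = i.toNat := by omega
    rw [if_pos this]
    rw [PySem.List.pyGetD_eq_getElem _ (d := 0) hj.1 (by simp [hrow]; omega),
        PySem.List.pyGetD_eq_getElem _ (d := 0) hj.1 (by simp [hrow]; omega)]
    rw [List.getElem_modify]
    by_cases hpj : p.2 = j
    · have : p.2.toNat = j.toNat := by omega
      rw [if_pos this, if_pos (by rw [← hpi, ← hpj])]
    · have : ¬ (p.2.toNat = j.toNat) := by omega
      rw [if_neg this, if_neg (by intro hc; rw [hc] at hpj; simp at hpj)]
      ring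
  · have : ¬ (p.1.toNat = i.toNat) := by omega
    rw [if_neg this, if_neg (by intro hc; rw [hc] at hpi; simp at hpi)]
    ring

theorem pvEntry_fold (n : Nat) (ps : List (Int × Int)) (m : List (List Int))
    (hm : m.length = n ∧ ∀ q : Nat, (h : q < m.length) → m[q].length = n)
    (hp : ∀ p ∈ ps, 0 ≤ p.1 ∧ p.1 < (n : Int) ∧ 0 ≤ p.2 ∧ p.2 < (n : Int))
    (i j : Int) (hi : 0 ≤ i ∧ i < (n : Int)) (hj : 0 ≤ j ∧ j < (n : Int)) :
    pvEntry (ps.foldl pvMUpd m) i j = pvEntry m i j + (ps.count (i, j) : Int) := by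
  induction ps generalizing m with
  | nil => simp
  | cons p ps ih =>
    simp only [List.foldl_cons]
    rw [ih _ (pvShape_upd n m p hm) (fun q hq => hp q (List.mem_cons_of_mem _ hq))]
    rw [pvEntry_upd n m p i j hm (hp p List.mem_cons_self) hi hj]
    rw [List.count_cons]
    by_cases h : p = (i, j) <;> simp [h] <;> push_cast <;> ring

theorem pvRowsum_upd (n : Nat) (m : List (List Int)) (p : Int × Int) (j : Int)
    (hm : m.length = n ∧ ∀ q : Nat, (h : q < m.length) → m[q].length = n)
    (hp : 0 ≤ p.1 ∧ p.1 < (n : Int) ∧ 0 ≤ p.2 ∧ p.2 < (n : Int))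
    (hj : 0 ≤ j ∧ j < (n : Int)) :
    (PySem.List.pyGetD (pvMUpd m p) j []).sum
      = (PySem.List.pyGetD m j []).sum + if p.1 = j then 1 else 0 := by
  obtain ⟨h1, h2⟩ := hm
  rw [PySem.List.pyGetD_eq_getElem m (d := []) hj.1 (by omega),
      PySem.List.pyGetD_eq_getElem (pvMUpd m p) (d := []) hj.1 (by simp [pvMUpd, h1]; omega)]
  simp only [pvMUpd]
  rw [List.getElem_modify]
  by_cases hpj : p.1 = j
  · rw [if_pos (by omega), if_pos hpj]
    exact pvSum_modify_add_one _ _ (by rw [h2 _ (by omega)]; omega)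
  · rw [if_neg (by omega), if_neg hpj]
    ring

theorem pvRowsum_fold (n : Nat) (ps : List (Int × Int)) (m : List (List Int))
    (hm : m.length = n ∧ ∀ q : Nat, (h : q < m.length) → m[q].length = n)
    (hp : ∀ p ∈ ps, 0 ≤ p.1 ∧ p.1 < (n : Int) ∧ 0 ≤ p.2 ∧ p.2 < (n : Int))
    (j : Int) (hj : 0 ≤ j ∧ j < (n : Int)) :
    (PySem.List.pyGetD (ps.foldl pvMUpd m) j []).sum
      = (PySem.List.pyGetD m j []).sum + (ps.countP (fun p => p.1 == j) : Int) := by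
  induction ps generalizing m with
  | nil => simp
  | cons p ps ih =>
    simp only [List.foldl_cons]
    rw [ih _ (pvShape_upd n m p hm) (fun q hq => hp q (List.mem_cons_of_mem _ hq))]
    rw [pvRowsum_upd n m p j hm (hp p List.mem_cons_self) hj]
    rw [List.countP_cons]
    by_cases h : p.1 = j <;> simp [h] <;> push_cast <;> ring

theorem pvColsum (n : Nat) (ps : List (Int × Int))
    (hp : ∀ p ∈ ps, 0 ≤ p.1 ∧ p.1 < (n : Int) ∧ 0 ≤ p.2 ∧ p.2 < (n : Int)) (j : Int) :
    ((PySem.List.pyRange 0 (n : Int)).map (fun i => (ps.count (i, j) : Int))).sum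
      = (ps.countP (fun p => p.2 == j) : Int) := by
  induction ps with
  | nil => simp
  | cons p ps ih =>
    have hp' := hp p List.mem_cons_self
    have ihh := ih (fun q hq => hp q (List.mem_cons_of_mem _ hq))
    simp only [List.count_cons]
    simp only [Nat.cast_add, Nat.cast_ite, Nat.cast_one, Nat.cast_zero]
    rw [PySem.List.sum_map_add_int, ihh]
    have h2 : ((PySem.List.pyRange 0 (n : Int)).map (fun i => (if p == (i, j) then 1 else 0 : Int))).sum
        = if p.2 == j then 1 else 0 := by
      rw [PySem.List.sum_map_ite_one_zero (fun i => p == (i, j))]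
      rw [PySem.List.pyRange_zero_natCast, List.countP_map]
      by_cases hpj : p.2 = j
      · have heq : (fun k : Nat => (p == ((k:Int), j))) = (fun k : Nat => k == p.1.toNat) := by
          funext k
          have : (p = ((k : Int), j)) ↔ (k = p.1.toNat) := by
            constructor
            · intro h; rw [h]; simp
            · intro h; subst h; have h1 : (p.1.toNat : Int) = p.1 := by omega
              rw [Prod.ext_iff]; simp [h1, hpj]
          simp [this]
        simp only [Function.comp_def]
        rw [heq, ← List.count, List.count_range]
        simp [hpj]
        omega
      · have heq : ∀ k : Nat, (p == ((k : Int), j)) = false := by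
          intro k
          simp only [beq_eq_false_iff_ne, ne_eq]
          intro h; rw [h] at hpj; simp at hpj
        simp only [Function.comp_def]
        simp [heq]
        intro h; rw [h] at hpj; simp at hpj
    rw [h2, List.countP_cons]
    by_cases hpj : p.2 = j <;> simp [hpj] <;> push_cast <;> ring

-- ---- combi ----
theorem pvCombi_eq (n : Int) :
    pvCombi n = (PySem.List.pyRange 0 n).flatMap
      (fun i => (PySem.List.pyRange (i+1) n).map (fun j => [i, j])) := by
  unfold pvCombi
  rw [pvDfs]
  simp only [List.length_nil, Nat.reduceBEq, Bool.false_eq_true, if_false,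
    PySem.List.foldl_append_eq_flatMap, List.nil_append]
  congr 1
  funext i
  rw [pvDfs]
  simp only [List.nil_append, List.length_cons, List.length_nil]
  have : ∀ j : Int, pvDfs n 1 (j+1) ([i] ++ [j]) = [[i, j]] := by
    intro j; rw [pvDfs]; simp
  simp only [this]
  norm_num
  exact Eq.symm List.map_eq_flatMap

-- structured (definitionally equal) reformulations of A's let-bound pieces
def pvAArr (friends gifts : List String) : List (List Int) :=
  gifts.foldl (fun arr v => pvMUpd arr (pvPOf (pvName friends) v))
    (List.replicate friends.length (List.replicate friends.length 0))

def pvAVal (n : Nat) (arr : List (List Int)) (j : Int) : Int :=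
  (PySem.List.pyGetD arr j []).sum
    - (PySem.List.pyRange 0 (n : Int)).foldl (fun t i => t + pvEntry arr i j) 0

def pvAGiftNum (friends gifts : List String) : PySem.Dict Int Int :=
  (PySem.List.pyRange 0 (friends.length : Int)).foldl
    (fun g j => g.insert j (pvAVal friends.length (pvAArr friends gifts) j)) PySem.Dict.empty

def pvAStep (arr : List (List Int)) (giftNum : PySem.Dict Int Int)
    (get : List Int) (pair : List Int) : List Int :=
  let idx1 := PySem.List.pyGetD pair 0 0
  let idx2 := PySem.List.pyGetD pair 1 0
  let v1 := pvEntry arr idx1 idx2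
  let v2 := pvEntry arr idx2 idx1
  if (v1 > 0 ∨ v2 > 0) ∧ v1 ≠ v2 then
    (if v1 > v2 then get.modify idx1.toNat (· + 1) else get.modify idx2.toNat (· + 1))
  else if giftNum.getD idx1 0 > giftNum.getD idx2 0 then get.modify idx1.toNat (· + 1)
  else if giftNum.getD idx2 0 > giftNum.getD idx1 0 then get.modify idx2.toNat (· + 1)
  else get

-- getD of a fold inserting a value at each key of range(n)
theorem pvGetD_fold_insert_fn (n : Nat) (val : Int → Int) (i : Int)
    (hi : i ∈ PySem.List.pyRange 0 (n : Int)) :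
    ((PySem.List.pyRange 0 (n : Int)).foldl (fun g j => g.insert j (val j)) PySem.Dict.empty).getD i 0
      = val i := by
  have hnd : (PySem.List.pyRange 0 (n : Int)).Nodup := by
    rw [PySem.List.pyRange_zero_natCast]
    exact List.Nodup.map (fun a b h => by omega) (List.nodup_range)
  have hitems := PySem.Dict.items_foldl_insert_fresh (PySem.List.pyRange 0 (n : Int))
    (fun j => j) val PySem.Dict.empty (by intro a _; rfl) (by simpa using hnd)
  apply PySem.Dict.getD_of_mem_items
  · rw [hitems]
    simp only [PySem.Dict.empty, List.nil_append]
    exact List.mem_map.mpr ⟨i, hi, rfl⟩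
  · have : (((PySem.List.pyRange 0 (n : Int)).foldl (fun g j => g.insert j (val j))
        PySem.Dict.empty)).keys = (PySem.Dict.empty (κ := Int) (ν := Int)).items.map (·.1)
        ++ ((PySem.List.pyRange 0 (n : Int)).map (fun a => ((fun j => j) a, val a))).map (·.1) := by
      simp only [PySem.Dict.keys, hitems, List.map_append]
    rw [this]
    simp only [PySem.Dict.empty, List.map_map, List.map_nil, List.nil_append]
    exact List.Nodup.map (fun a b h => by simpa using h) hnd

theorem pvA_eq_common (friends gifts : List String) (hpre : Pre_solution friends gifts) :
    solution friends gifts = pvCommon friends gifts := by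
  have hA : solution friends gifts =
      (PySem.List.max? ((pvCombi (friends.length : Int)).foldl
          (pvAStep (pvAArr friends gifts) (pvAGiftNum friends gifts))
          (List.replicate friends.length 0))
        (fun x => x)).getD 0 := rfl
  rw [hA]
  set n := friends.length with hn
  set name := pvName friends with hname
  set ps := gifts.map (pvPOf name) with hps
  have hpsR : ∀ p ∈ ps, 0 ≤ p.1 ∧ p.1 < (n : Int) ∧ 0 ≤ p.2 ∧ p.2 < (n : Int) := by
    have := pvPs_range friends gifts hpre
    simpa [pvPs, ← hname, ← hps, ← hn] using this
  have hshape0 : (List.replicate n (List.replicate n (0:Int))).length = n ∧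
      ∀ q : Nat, (h : q < (List.replicate n (List.replicate n (0:Int))).length) →
        (List.replicate n (List.replicate n (0:Int)))[q].length = n := by
    constructor
    · simp
    · intro q hq; simp
  have harr : pvAArr friends gifts = ps.foldl pvMUpd (List.replicate n (List.replicate n 0)) := by
    unfold pvAArr
    rw [hps, List.foldl_map, ← hname, ← hn]
  have hEntry0 : ∀ i j : Int, 0 ≤ i → i < (n : Int) → 0 ≤ j → j < (n : Int) →
      pvEntry (List.replicate n (List.replicate n 0)) i j = 0 := by
    intro i j hi1 hi2 hj1 hj2
    unfold pvEntry
    rw [PySem.List.pyGetD_eq_getElem _ (d := []) hi1 (by simp; omega)]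
    rw [List.getElem_replicate]
    rw [PySem.List.pyGetD_eq_getElem _ (d := 0) hj1 (by simp; omega)]
    simp
  have hEntry : ∀ i j : Int, 0 ≤ i → i < (n : Int) → 0 ≤ j → j < (n : Int) →
      pvEntry (pvAArr friends gifts) i j = (ps.count (i, j) : Int) := by
    intro i j hi1 hi2 hj1 hj2
    rw [harr, pvEntry_fold n ps _ hshape0 hpsR i j ⟨hi1, hi2⟩ ⟨hj1, hj2⟩,
      hEntry0 i j hi1 hi2 hj1 hj2, zero_add]
  have hRowsum0 : ∀ j : Int, 0 ≤ j → j < (n : Int) →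
      (PySem.List.pyGetD (List.replicate n (List.replicate n (0:Int))) j []).sum = 0 := by
    intro j hj1 hj2
    rw [PySem.List.pyGetD_eq_getElem _ (d := []) hj1 (by simp; omega)]
    simp
  have hCountF : ∀ i : Int, ((ps.map Prod.fst).count i : Int) = (ps.countP (fun p => p.1 == i) : Int) := by
    intro i
    rw [List.count_eq_countP, List.countP_map]
    rfl
  have hCountS : ∀ i : Int, ((ps.map Prod.snd).count i : Int) = (ps.countP (fun p => p.2 == i) : Int) := by
    intro i
    rw [List.count_eq_countP, List.countP_map]
    rfl
  have hGiftNum : ∀ i : Int, i ∈ PySem.List.pyRange 0 (n : Int) →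
      (pvAGiftNum friends gifts).getD i 0
        = ((ps.map Prod.fst).count i : Int) - ((ps.map Prod.snd).count i : Int) := by
    intro i hi
    have hib := PySem.List.mem_pyRange_one.mp hi
    unfold pvAGiftNum
    rw [← hn, pvGetD_fold_insert_fn n (pvAVal n (pvAArr friends gifts)) i hi]
    unfold pvAVal
    rw [PySem.List.foldl_add, zero_add]
    rw [harr, pvRowsum_fold n ps _ hshape0 hpsR i ⟨hib.1, hib.2⟩,
      hRowsum0 i hib.1 hib.2, zero_add]
    rw [← harr]
    have hmapc : (PySem.List.pyRange 0 (n : Int)).map (fun k => pvEntry (pvAArr friends gifts) k i)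
        = (PySem.List.pyRange 0 (n : Int)).map (fun k => (ps.count (k, i) : Int)) := by
      apply List.map_congr_left
      intro k hk
      have hkb := PySem.List.mem_pyRange_one.mp hk
      exact hEntry k i hkb.1 hkb.2 hib.1 hib.2
    rw [hmapc, pvColsum n ps hpsR i, hCountF, hCountS]
  rw [pvCombi_eq, List.foldl_flatMap]
  simp only [pvCommon, ← hname, ← hps, ← hn]
  congr 1
  congr 1
  apply PySem.List.foldl_congr_mem
  intro acc i hi
  have hib := PySem.List.mem_pyRange_one.mp hi
  rw [List.foldl_map]
  apply PySem.List.foldl_congr_mem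
  intro get j hj
  have hjb := PySem.List.mem_pyRange_one.mp hj
  have hj' : j ∈ PySem.List.pyRange 0 (n : Int) := PySem.List.mem_pyRange_one.mpr ⟨by omega, hjb.2⟩
  simp only [pvAStep, pvStep, PySem.List.pyGetD_ofNat', List.getD_cons_zero,
    List.getD_cons_succ]
  rw [hEntry i j hib.1 hib.2 (by omega) hjb.2, hEntry j i (by omega) hjb.2 hib.1 hib.2,
    hGiftNum i hi, hGiftNum j hj']

-- ---- B-side machinery ----

theorem pvMem_allPairs (n : Nat) (p : Int × Int) :
    p ∈ pvAllPairs n ↔ 0 ≤ p.1 ∧ p.1 < p.2 ∧ p.2 < (n : Int) := by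
  unfold pvAllPairs
  simp only [List.mem_flatMap, List.mem_map, PySem.List.mem_pyRange_one]
  constructor
  · rintro ⟨i, hi, j, hj, rfl⟩
    exact ⟨hi.1, by omega, hj.2⟩
  · rintro ⟨h1, h2, h3⟩
    exact ⟨p.1, ⟨h1, by omega⟩, p.2, ⟨by omega, h3⟩, rfl⟩

theorem pvNodup_allPairs (n : Nat) : (pvAllPairs n).Nodup := by
  unfold pvAllPairs
  rw [List.nodup_flatMap]
  constructor
  · intro i _
    exact List.Nodup.map (fun a b h => congrArg Prod.snd h)
      (PySem.List.nodup_pyRange_one _ _)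
  · refine (PySem.List.pairwise_lt_pyRange_one 0 (n : Int)).imp ?_
    intro a b hab
    intro x hxa hxb
    obtain ⟨j1, _, rfl⟩ := List.mem_map.mp hxa
    obtain ⟨j2, _, h2⟩ := List.mem_map.mp hxb
    have := congrArg Prod.fst h2
    simp at this
    omega

theorem pvGetModify (w : List Int) (i k : Nat) (f : Int → Int) (hk : k < w.length) :
    (w.modify i f)[k]! = if i = k then f (w[k]!) else w[k]! := by
  have hk' : k < (w.modify i f).length := by simpa using hk
  rw [getElem!_pos (w.modify i f) k hk', List.getElem_modify]
  split_ifs with h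
  · rw [getElem!_pos w k hk]
  · rw [getElem!_pos w k hk]

theorem pvFoldDelta {α : Type} (F : List Int → α → List Int) (δ : α → Nat → Int) (n : Nat) :
    ∀ (L : List α) (w : List Int), w.length = n →
    (∀ x ∈ L, ∀ v : List Int, v.length = n →
        (F v x).length = n ∧ ∀ k, k < n → (F v x)[k]! = v[k]! + δ x k) →
    (L.foldl F w).length = n ∧
      ∀ k, k < n → (L.foldl F w)[k]! = w[k]! + (L.map (fun x => δ x k)).sum := by
  intro L
  induction L with
  | nil =>
    intro w hw _
    exact ⟨hw, fun k hk => by simp⟩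
  | cons x L ih =>
    intro w hw hF
    have hx := hF x List.mem_cons_self w hw
    have ih' := ih (F w x) hx.1 (fun y hy => hF y (List.mem_cons_of_mem _ hy))
    refine ⟨ih'.1, ?_⟩
    intro k hk
    simp only [List.foldl_cons, List.map_cons, List.sum_cons]
    rw [ih'.2 k hk, hx.2 k hk]
    ring

theorem pvDelta_split (ps : List (Int × Int)) (k : Int) (p : Int × Int) :
    pvDelta ps k p = pvGPick ps k p.1 p.2 + pvAdj ps k p := by
  obtain ⟨i, j⟩ := p
  by_cases hc : pvC ps (i, j) ≠ pvC ps (j, i)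
  · simp only [pvDelta, pvWin, pvAdj, if_pos hc, Option.some.injEq]
    split_ifs <;> omega
  · simp only [pvDelta, pvWin, pvAdj, pvGPick, if_neg hc]
    by_cases h1 : pvG ps i > pvG ps j
    · have h2 : ¬ (pvG ps j > pvG ps i) := by omega
      simp only [if_pos h1, Option.some.injEq]
      split_ifs <;> omega
    · by_cases h2 : pvG ps j > pvG ps i
      · simp only [if_neg h1, if_pos h2, Option.some.injEq]
        split_ifs <;> omega
      · simp only [if_neg h1, if_neg h2]
        have h3 : ((if (none : Option Int) = some k then (1:Int) else 0)) = 0 := by simp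
        rw [h3]
        split_ifs <;> omega

theorem pvGetAdd (w : List Int) (i k : Nat) (t : Int) (hk : k < w.length) :
    (w.modify i (· + t))[k]! = w[k]! + if i = k then t else 0 := by
  rw [pvGetModify w i k _ hk]
  split_ifs <;> simp

theorem pvGetSub (w : List Int) (i k : Nat) (t : Int) (hk : k < w.length) :
    (w.modify i (fun x => x - t))[k]! = w[k]! + if i = k then -t else 0 := by
  rw [pvGetModify w i k _ hk]
  split_ifs <;> simp [sub_eq_add_neg]

theorem pvSumInd {α : Type} (l : List α) (P : α → Prop) [DecidablePred P] :
    (l.map (fun x => if P x then (1:Int) else 0)).sum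
      = (l.countP (fun x => decide (P x)) : Int) := by
  induction l with
  | nil => simp
  | cons x l ih =>
    rw [List.map_cons, List.sum_cons, List.countP_cons, ih]
    by_cases h : P x <;> simp [h] <;> omega

theorem pvSumIndNeg {α : Type} (l : List α) (P : α → Prop) [DecidablePred P] :
    (l.map (fun x => if P x then (-1:Int) else 0)).sum
      = -(l.countP (fun x => decide (P x)) : Int) := by
  induction l with
  | nil => simp
  | cons x l ih =>
    rw [List.map_cons, List.sum_cons, List.countP_cons, ih]
    by_cases h : P x <;> simp [h] <;> omega

theorem pvDelta_eq (ps : List (Int × Int)) (k i j : Int) :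
    pvDelta ps k (i, j)
      = if pvC ps (i, j) ≠ pvC ps (j, i) then
          (if (if pvC ps (i, j) > pvC ps (j, i) then i else j) = k then (1:Int) else 0)
        else if pvG ps i > pvG ps j then (if i = k then (1:Int) else 0)
        else if pvG ps j > pvG ps i then (if j = k then (1:Int) else 0)
        else 0 := by
  by_cases h1 : pvC ps (i, j) ≠ pvC ps (j, i)
  · simp only [pvDelta, pvWin, if_pos h1, Option.some.injEq]
  · simp only [pvDelta, pvWin, if_neg h1]
    by_cases h2 : pvG ps i > pvG ps j
    · simp only [if_pos h2, Option.some.injEq]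
    · simp only [if_neg h2]
      by_cases h3 : pvG ps j > pvG ps i
      · simp only [if_pos h3, Option.some.injEq]
      · simp only [if_neg h3]
        simp

theorem pvStep_delta (ps : List (Int × Int)) (n : Nat) (i j : Int)
    (hi : 0 ≤ i ∧ i < (n : Int)) (hj : 0 ≤ j ∧ j < (n : Int))
    (v : List Int) (hv : v.length = n) :
    (pvStep ps i j v).length = n ∧
      ∀ k, k < n → (pvStep ps i j v)[k]! = v[k]! + pvDelta ps (k : Int) (i, j) := by
  constructor
  · simp only [pvStep]
    split_ifs <;> simp [hv]
  · intro k hk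
    have hkv : k < v.length := by omega
    rw [pvDelta_eq]
    simp only [pvStep, pvC, pvG]
    split_ifs <;>
      (try rw [pvGetAdd _ _ _ _ hkv]) <;>
      (try split_ifs) <;>
      omega

theorem pvSumPoint (l : List Int) (hnd : l.Nodup) (k : Int) (f : Int → Int)
    (h0 : ∀ x ∈ l, x ≠ k → f x = 0) :
    (l.map f).sum = if k ∈ l then f k else 0 := by
  induction l with
  | nil => simp
  | cons x l ih =>
    obtain ⟨hx, hnd'⟩ := List.nodup_cons.mp hnd
    by_cases hxk : x = k
    · subst hxk
      have hz : (l.map f).sum = 0 := by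
        apply List.sum_eq_zero
        intro y hy
        obtain ⟨z, hz, rfl⟩ := List.mem_map.mp hy
        exact h0 z (List.mem_cons_of_mem _ hz) (fun hzx => hx (hzx ▸ hz))
      simp [hz]
    · have ih' := ih hnd' (fun y hy hyk => h0 y (List.mem_cons_of_mem _ hy) hyk)
      have hfx : f x = 0 := h0 x List.mem_cons_self hxk
      have hkx : ¬ (k = x) := fun h => hxk h.symm
      simp [hfx, ih', hkx, List.mem_cons]

theorem pvSumFilter {α : Type} (l : List α) (q : α → Bool) (h : α → Int) :
    (l.map (fun x => if q x then h x else 0)).sum = ((l.filter q).map h).sum := by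
  induction l with
  | nil => simp
  | cons x l ih =>
    by_cases hq : q x <;> simp [List.filter_cons, hq, ih]

theorem pvGPick_sum (ps : List (Int × Int)) (n : Nat) (k : Int) (hk : 0 ≤ k ∧ k < (n : Int)) :
    ((pvAllPairs n).map (fun p => pvGPick ps k p.1 p.2)).sum
      = (List.countP (fun m => decide (pvG ps m < pvG ps k)) (PySem.List.pyRange 0 (n : Int)) : Int) := by
  have hkmem : k ∈ PySem.List.pyRange 0 (n:Int) := PySem.List.mem_pyRange_one.mpr ⟨hk.1, hk.2⟩
  unfold pvAllPairs
  rw [List.map_flatMap, List.flatMap_def, List.sum_flatten, List.map_map]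
  have hmc : (List.map (List.sum ∘ fun a =>
        List.map (fun p => pvGPick ps k p.1 p.2)
          (List.map (fun j => (a, j)) (PySem.List.pyRange (a+1) (n:Int))))
        (PySem.List.pyRange 0 (n:Int)))
      = (PySem.List.pyRange 0 (n:Int)).map
          (fun i => ((PySem.List.pyRange (i+1) (n:Int)).map (fun j => pvGPick ps k i j)).sum) := by
    apply List.map_congr_left
    intro i _
    simp only [Function.comp_apply, List.map_map]
    rfl
  rw [hmc]
  have hrow : ∀ i ∈ PySem.List.pyRange 0 (n:Int),
      ((PySem.List.pyRange (i+1) (n:Int)).map (fun j => pvGPick ps k i j)).sum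
      = (if i = k then ((PySem.List.pyRange (k+1) (n:Int)).map
            (fun j => if pvG ps j < pvG ps k then (1:Int) else 0)).sum else 0)
        + (if i < k ∧ pvG ps i < pvG ps k then (1:Int) else 0) := by
    intro i _
    simp only [pvGPick]
    rw [PySem.List.sum_map_add_int]
    congr 1
    · by_cases hik : i = k
      · subst hik
        rw [if_pos rfl]
        apply congrArg List.sum
        apply List.map_congr_left
        intro j _
        simp
      · rw [if_neg hik]
        apply List.sum_eq_zero
        intro y hy
        obtain ⟨j, hj, rfl⟩ := List.mem_map.mp hy
        simp [hik]
    · rw [pvSumPoint _ (PySem.List.nodup_pyRange_one _ _) k _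
        (fun x _ hxk => by simp [hxk])]
      simp only [PySem.List.mem_pyRange_one]
      by_cases hik : i < k
      · rw [if_pos (⟨by omega, by omega⟩ : (i + 1 ≤ k ∧ k < (n:Int)))]
        by_cases hg : pvG ps i < pvG ps k
        · rw [if_pos (by simp [hg]), if_pos ⟨hik, hg⟩]
        · rw [if_neg (by simp [hg]), if_neg (fun h => hg h.2)]
      · rw [if_neg (fun h => hik (by omega)), if_neg (fun h => hik h.1)]
  rw [List.map_congr_left hrow, PySem.List.sum_map_add_int]
  have hT : ((PySem.List.pyRange 0 (n:Int)).map (fun i => if i = k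
      then ((PySem.List.pyRange (k+1) (n:Int)).map
            (fun j => if pvG ps j < pvG ps k then (1:Int) else 0)).sum else 0)).sum
      = ((PySem.List.pyRange (k+1) (n:Int)).map
            (fun j => if pvG ps j < pvG ps k then (1:Int) else 0)).sum := by
    rw [pvSumPoint _ (PySem.List.nodup_pyRange_one _ _) k _
      (fun x _ hxk => by simp [hxk])]
    simp [hkmem]
  rw [hT, ← pvSumInd (PySem.List.pyRange 0 (n:Int)) (fun m => pvG ps m < pvG ps k)]
  have hsplit : PySem.List.pyRange 0 (n:Int)
      = PySem.List.pyRange 0 k ++ ([k] ++ PySem.List.pyRange (k+1) (n:Int)) := by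
    rw [PySem.List.pyRange_one_append 0 k (n:Int) hk.1 (by omega),
        PySem.List.pyRange_one_append k (k+1) (n:Int) (by omega) (by omega),
        PySem.List.pyRange_one_singleton]
  rw [hsplit]
  simp only [List.map_append, List.sum_append, List.map_cons, List.sum_cons,
    List.map_nil, List.sum_nil]
  have hb : (if k < k ∧ pvG ps k < pvG ps k then (1:Int) else 0) = 0 := by simp
  have hc : (if pvG ps k < pvG ps k then (1:Int) else 0) = 0 := by simp
  have hS1 : ((PySem.List.pyRange 0 k).map (fun i => if i < k ∧ pvG ps i < pvG ps k then (1:Int) else 0)).sum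
      = ((PySem.List.pyRange 0 k).map (fun i => if pvG ps i < pvG ps k then (1:Int) else 0)).sum := by
    apply congrArg List.sum
    apply List.map_congr_left
    intro i hi
    have := PySem.List.mem_pyRange_one.mp hi
    split_ifs <;> omega
  have hS3 : ((PySem.List.pyRange (k+1) (n:Int)).map (fun i => if i < k ∧ pvG ps i < pvG ps k then (1:Int) else 0)).sum = 0 := by
    apply List.sum_eq_zero
    intro y hy
    obtain ⟨i, hi, rfl⟩ := List.mem_map.mp hy
    have := PySem.List.mem_pyRange_one.mp hi
    rw [if_neg (by omega)]
  rw [hb, hc, hS1, hS3]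
  omega

theorem pvAdjKeep_iff (ps : List (Int × Int)) (x : Int × Int) :
    pvKeepB ps x = true ↔ (¬ x.1 = x.2 ∧ ¬(x.2 < x.1 ∧ (x.2, x.1) ∈ ps)) := by
  constructor
  · intro h
    refine ⟨?_, ?_⟩
    · intro hab
      have hb : (x.1 == x.2) = true := beq_iff_eq.mpr hab
      simp [pvKeepB, hb] at h
    · rintro ⟨hlt, hmem⟩
      simp [pvKeepB, decide_eq_true hlt, hmem] at h
  · rintro ⟨h1, h2⟩
    have hb1 : (x.1 == x.2) = false := beq_eq_false_iff_ne.mpr h1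
    by_cases hlt : x.2 < x.1
    · have hmem : (x.2, x.1) ∉ ps := fun hm => h2 ⟨hlt, hm⟩
      simp [pvKeepB, hb1, hmem]
    · have hb3 : decide (x.2 < x.1) = false := decide_eq_false hlt
      simp [pvKeepB, hb1, hb3]

theorem pvAdj_sum (ps : List (Int × Int)) (n : Nat) (k : Int)
    (hrange : ∀ p ∈ ps, 0 ≤ p.1 ∧ p.1 < (n : Int) ∧ 0 ≤ p.2 ∧ p.2 < (n : Int)) :
    ((pvAllPairs n).map (pvAdj ps k)).sum
      = ((((PySem.Set.ofList ps).filter (pvKeepB ps)).map pvCanon).map (pvAdj ps k)).sum := by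
  have hndK : (PySem.Set.ofList ps).Nodup := PySem.Set.nodup_ofList ps
  have hndF : ((PySem.Set.ofList ps).filter (pvKeepB ps)).Nodup := hndK.filter _
  have hkeep : ∀ x : Int × Int, pvKeepB ps x = true
      ↔ (¬ x.1 = x.2 ∧ ¬(x.2 < x.1 ∧ (x.2, x.1) ∈ ps)) := pvAdjKeep_iff ps
  have hmemF : ∀ x, x ∈ (PySem.Set.ofList ps).filter (pvKeepB ps)
      → x ∈ ps ∧ ¬ x.1 = x.2 ∧ ¬(x.2 < x.1 ∧ (x.2, x.1) ∈ ps) := by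
    intro x hx
    rw [List.mem_filter] at hx
    exact ⟨(PySem.Set.mem_ofList ps x).mp hx.1, (hkeep x).mp hx.2⟩
  have hEnd : (((PySem.Set.ofList ps).filter (pvKeepB ps)).map pvCanon).Nodup := by
    apply List.Nodup.map_on ?_ hndF
    intro a ha b hb hab
    obtain ⟨haps, ha1, ha2⟩ := hmemF a ha
    obtain ⟨hbps, hb1, hb2⟩ := hmemF b hb
    unfold pvCanon at hab
    by_cases hal : a.1 < a.2 <;> by_cases hbl : b.1 < b.2
    · rw [if_pos hal, if_pos hbl] at hab
      exact hab
    · rw [if_pos hal, if_neg hbl] at hab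
      exact absurd ⟨by omega, hab ▸ haps⟩ hb2
    · rw [if_neg hal, if_pos hbl] at hab
      exact absurd ⟨by omega, by rw [hab]; exact hbps⟩ ha2
    · rw [if_neg hal, if_neg hbl] at hab
      have e1 : a.2 = b.2 := congrArg Prod.fst hab
      have e2 : a.1 = b.1 := congrArg Prod.snd hab
      exact Prod.ext e2 e1
  have hEsub : ∀ x ∈ ((PySem.Set.ofList ps).filter (pvKeepB ps)).map pvCanon,
      x ∈ pvAllPairs n := by
    intro x hx
    obtain ⟨y, hy, rfl⟩ := List.mem_map.mp hx
    obtain ⟨hyps, hy1, hy2⟩ := hmemF y hy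
    obtain ⟨b1, b2, b3, b4⟩ := hrange y hyps
    rw [pvMem_allPairs]
    unfold pvCanon
    by_cases hyl : y.1 < y.2
    · rw [if_pos hyl]
      exact ⟨b1, hyl, b4⟩
    · rw [if_neg hyl]
      exact ⟨b3, by omega, b2⟩
  have hzero : ∀ x ∈ pvAllPairs n,
      x ∉ ((PySem.Set.ofList ps).filter (pvKeepB ps)).map pvCanon → pvAdj ps k x = 0 := by
    intro x hxall hxE
    obtain ⟨hb1, hb2, hb3⟩ := (pvMem_allPairs n x).mp hxall
    unfold pvAdj
    have hcc : ¬(pvC ps x ≠ pvC ps (x.2, x.1)) := by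
      intro hne
      have h1 : x ∈ ps ∨ (x.2, x.1) ∈ ps := by
        by_contra hno
        push_neg at hno
        have c1 : ps.count x = 0 := List.count_eq_zero.mpr hno.1
        have c2 : ps.count (x.2, x.1) = 0 := List.count_eq_zero.mpr hno.2
        exact hne (by unfold pvC; rw [c1, c2])
      apply hxE
      by_cases hxps : x ∈ ps
      · refine List.mem_map.mpr ⟨x,
          List.mem_filter.mpr ⟨(PySem.Set.mem_ofList ps x).mpr hxps, ?_⟩, ?_⟩
        · rw [hkeep]
          exact ⟨by omega, fun h => absurd h.1 (not_lt.mpr (le_of_lt hb2))⟩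
        · unfold pvCanon
          rw [if_pos hb2]
      · have hswap : (x.2, x.1) ∈ ps := h1.resolve_left hxps
        refine List.mem_map.mpr ⟨(x.2, x.1),
          List.mem_filter.mpr ⟨(PySem.Set.mem_ofList ps (x.2, x.1)).mpr hswap, ?_⟩, ?_⟩
        · rw [hkeep]
          refine ⟨fun h => absurd (h : x.2 = x.1) (by omega), ?_⟩
          rintro ⟨-, hmem⟩
          exact hxps hmem
        · unfold pvCanon
          rw [if_neg (not_lt.mpr (le_of_lt hb2) : ¬ ((x.2, x.1).1 < (x.2, x.1).2))]
    rw [if_neg hcc]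
  rw [← List.sum_toFinset _ (pvNodup_allPairs n), ← List.sum_toFinset _ hEnd]
  refine (Finset.sum_subset ?_ ?_).symm
  · intro x hx
    rw [List.mem_toFinset] at hx ⊢
    exact hEsub x hx
  · intro x hx hnx
    rw [List.mem_toFinset] at hx
    exact hzero x hx (fun hmem => hnx (List.mem_toFinset.mpr hmem))

theorem pvFirst_getD (s : List Int) (t : Int) (d : PySem.Dict Int Int) (v : Int) :
    ((PySem.List.enumerate s t).foldl
        (fun f p => if f.contains p.2 then f else f.insert p.2 p.1) d).getD v 0
      = if d.contains v then d.getD v 0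
        else if v ∈ s then t + (s.idxOf v : Int) else 0 := by
  induction s generalizing t d with
  | nil =>
    simp only [PySem.List.enumerate_nil, List.foldl_nil, List.not_mem_nil, if_false]
    by_cases hc : d.contains v
    · simp [hc]
    · simp [hc, PySem.Dict.getD_of_not_contains d 0 (by simpa using hc)]
  | cons x s ih =>
    rw [PySem.List.enumerate_cons, List.foldl_cons]
    by_cases hcx : d.contains x
    · rw [if_pos hcx, ih (t+1) d]
      by_cases hcv : d.contains v
      · simp [hcv]
      · have hvx : v ≠ x := fun h => hcv (h ▸ hcx)
        simp only [hcv, if_false, List.mem_cons, hvx, false_or]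
        by_cases hvs : v ∈ s
        · rw [if_pos hvs, if_pos hvs, List.idxOf_cons_ne _ (fun h => hvx h.symm)]
          push_cast [Nat.succ_eq_add_one]
          ring
        · simp [hvs]
    · rw [if_neg hcx, ih (t+1) (d.insert x t)]
      by_cases hvx : v = x
      · subst hvx
        simp only [PySem.Dict.contains_insert_self, if_true, PySem.Dict.getD_insert_self]
        simp [hcx, List.idxOf_cons_self]
      · have hci : (d.insert x t).contains v = d.contains v := by
          rw [PySem.Dict.contains_insert]
          simp [hvx]
        rw [hci, PySem.Dict.getD_insert_of_ne _ _ _ hvx]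
        by_cases hcv : d.contains v
        · simp [hcv]
        · simp only [hcv, if_false, List.mem_cons, hvx, false_or]
          by_cases hvs : v ∈ s
          · rw [if_pos hvs, if_pos hvs, List.idxOf_cons_ne _ (fun h => hvx h.symm)]
            push_cast [Nat.succ_eq_add_one]
            ring
          · simp [hvs]

theorem pvIdxOf_sorted (s : List Int) (hs : s.Pairwise (· ≤ ·)) (v : Int) (hv : v ∈ s) :
    s.idxOf v = s.countP (fun x => decide (x < v)) := by
  induction s with
  | nil => simp at hv
  | cons x s ih =>
    obtain ⟨hx, hs'⟩ := List.pairwise_cons.mp hs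
    by_cases hxv : x = v
    · subst hxv
      have hz : s.countP (fun y => decide (y < x)) = 0 := by
        rw [List.countP_eq_zero]
        intro a ha
        simpa using not_lt.mpr (hx a ha)
      rw [List.idxOf_cons_self, List.countP_cons]
      simp [hz]
    · have hvs : v ∈ s := by
        rcases List.mem_cons.mp hv with h | h
        · exact absurd h.symm hxv
        · exact h
      have hxlt : x < v := lt_of_le_of_ne (hx v hvs) hxv
      rw [List.idxOf_cons_ne _ hxv, List.countP_cons, ih hs' hvs]
      simp [hxlt]

-- proof-side names for B's let-bound pieces (definitionally equal to the port's lets)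
def pvBSt (name : PySem.Dict String Int) (gifts : List String) (n : Nat) :
    PySem.Dict (Int × Int) Int × List Int :=
  gifts.foldl
    (fun (s : PySem.Dict (Int × Int) Int × List Int) g =>
      let parts := (PySem.Str.split? g " ").getD []
      let i := (name.get? (PySem.List.pyGetD parts 0 "")).getD 0
      let j := (name.get? (PySem.List.pyGetD parts 1 "")).getD 0
      (s.1.insert (i, j) (s.1.getD (i, j) 0 + 1),
       (s.2.modify i.toNat (· + 1)).modify j.toNat (fun x => x - 1)))
    (PySem.Dict.empty, List.replicate n 0)

def pvBFirst (gidx : List Int) : PySem.Dict Int Int :=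
  (PySem.List.enumerate (PySem.List.sorted gidx (fun x => x) false)).foldl
    (fun f p => if f.contains p.2 then f else f.insert p.2 p.1) PySem.Dict.empty

def pvBStepK (d : PySem.Dict (Int × Int) Int) (gidx : List Int)
    (wins : List Int) (p : Int × Int) : List Int :=
  if p.1 == p.2 || (decide (p.2 < p.1) && d.contains (p.2, p.1)) then wins
  else
    let lo := if p.1 < p.2 then p.1 else p.2
    let hi := if p.1 < p.2 then p.2 else p.1
    let v1 := d.getD (lo, hi) 0
    let v2 := d.getD (hi, lo) 0
    if v1 ≠ v2 then
      let wins := if v1 > v2 then wins.modify lo.toNat (· + 1) else wins.modify hi.toNat (· + 1)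
      if PySem.List.pyGetD gidx lo 0 > PySem.List.pyGetD gidx hi 0 then
        wins.modify lo.toNat (fun x => x - 1)
      else if PySem.List.pyGetD gidx hi 0 > PySem.List.pyGetD gidx lo 0 then
        wins.modify hi.toNat (fun x => x - 1)
      else wins
    else wins

def pvGidxF (ps : List (Int × Int)) (n : Nat) : List Int :=
  ps.foldl (fun l p => (l.modify p.1.toNat (· + 1)).modify p.2.toNat (fun x => x - 1))
    (List.replicate n 0)

theorem pvBSt_split (name : PySem.Dict String Int) (gifts : List String) :
    ∀ (a : PySem.Dict (Int × Int) Int) (b : List Int),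
    gifts.foldl
      (fun (s : PySem.Dict (Int × Int) Int × List Int) g =>
        let parts := (PySem.Str.split? g " ").getD []
        let i := (name.get? (PySem.List.pyGetD parts 0 "")).getD 0
        let j := (name.get? (PySem.List.pyGetD parts 1 "")).getD 0
        (s.1.insert (i, j) (s.1.getD (i, j) 0 + 1),
         (s.2.modify i.toNat (· + 1)).modify j.toNat (fun x => x - 1)))
      (a, b)
    = (gifts.foldl (fun d g => d.insert (pvPOf name g) (d.getD (pvPOf name g) 0 + 1)) a,
       gifts.foldl (fun l g =>
         (l.modify (pvPOf name g).1.toNat (· + 1)).modify (pvPOf name g).2.toNat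
           (fun x => x - 1)) b) := by
  induction gifts with
  | nil => intro a b; rfl
  | cons g gifts ih =>
    intro a b
    simp only [List.foldl_cons]
    exact ih _ _

theorem pvGidxF_spec (ps : List (Int × Int)) (n : Nat)
    (hpsR : ∀ p ∈ ps, 0 ≤ p.1 ∧ p.1 < (n : Int) ∧ 0 ≤ p.2 ∧ p.2 < (n : Int)) :
    (pvGidxF ps n).length = n ∧ ∀ k, k < n → (pvGidxF ps n)[k]! = pvG ps (k : Int) := by
  have hfold := pvFoldDelta
      (fun l p => (l.modify p.1.toNat (· + 1)).modify p.2.toNat (fun x => x - 1))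
      (fun p k => (if p.1 = (k:Int) then (1:Int) else 0) + (if p.2 = (k:Int) then (-1:Int) else 0))
      n ps (List.replicate n 0) (by simp)
      (by
        intro p hp v hv
        obtain ⟨h1, h2, h3, h4⟩ := hpsR p hp
        refine ⟨by simp [hv], ?_⟩
        intro k hk
        show ((v.modify p.1.toNat (· + 1)).modify p.2.toNat (fun x => x - 1))[k]!
            = v[k]! + ((if p.1 = (k:Int) then (1:Int) else 0)
                + (if p.2 = (k:Int) then (-1:Int) else 0))
        have hkv : k < (v.modify p.1.toNat (· + 1)).length := by simp [hv]; omega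
        rw [pvGetSub _ _ _ _ hkv, pvGetAdd _ _ _ _ (by omega)]
        split_ifs <;> omega)
  refine ⟨hfold.1, ?_⟩
  intro k hk
  have hrep : (List.replicate n (0:Int))[k]! = 0 := by
    rw [getElem!_pos (List.replicate n (0:Int)) k (by simp [hk])]
    simp
  rw [pvGidxF, hfold.2 k hk, hrep, PySem.List.sum_map_add_int,
    pvSumInd ps (fun p => p.1 = (k:Int)), pvSumIndNeg ps (fun p => p.2 = (k:Int))]
  have hf : ps.countP (fun p => decide (p.1 = (k:Int))) = (ps.map Prod.fst).count (k:Int) := by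
    rw [List.count_eq_countP, List.countP_map]
    apply List.countP_congr
    intro x _
    simp
  have hs : ps.countP (fun p => decide (p.2 = (k:Int))) = (ps.map Prod.snd).count (k:Int) := by
    rw [List.count_eq_countP, List.countP_map]
    apply List.countP_congr
    intro x _
    simp
  rw [hf, hs, pvG]
  omega

theorem pvWins0_spec (ps : List (Int × Int)) (n : Nat) (gidx : List Int)
    (hlen : gidx.length = n) (hent : ∀ k, k < n → gidx[k]! = pvG ps (k : Int)) :
    (gidx.map (fun v => (pvBFirst gidx).getD v 0)).length = n ∧
      ∀ k, k < n → (gidx.map (fun v => (pvBFirst gidx).getD v 0))[k]!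
        = ((PySem.List.pyRange 0 (n:Int)).countP
            (fun m => decide (pvG ps m < pvG ps (k:Int))) : Int) := by
  have heq : gidx = (PySem.List.pyRange 0 (n:Int)).map (pvG ps) := by
    apply List.ext_getElem (by simp [hlen, PySem.List.length_pyRange_one])
    intro q h1 h2
    rw [List.getElem_map, PySem.List.getElem_pyRange_one,
      ← getElem!_pos gidx q h1, hent q (by omega)]
    norm_num
  refine ⟨by simp [hlen], ?_⟩
  intro k hk
  have hk' : k < gidx.length := by omega
  rw [getElem!_pos _ _ (by simp [hlen]; omega), List.getElem_map]
  have hgk : gidx[k] = pvG ps (k:Int) := by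
    rw [← getElem!_pos gidx k hk', hent k hk]
  rw [pvBFirst, pvFirst_getD]
  rw [if_neg (by simp [PySem.Dict.contains_empty])]
  have hmem : gidx[k] ∈ PySem.List.sorted gidx (fun x => x) false :=
    (PySem.List.mem_sorted _ _ _ _).mpr (List.getElem_mem hk')
  rw [if_pos hmem]
  rw [pvIdxOf_sorted _ (by simpa using PySem.List.sorted_pairwise gidx (fun x => x)) _ hmem]
  rw [(PySem.List.sorted_perm gidx (fun x => x) false).countP_eq]
  rw [hgk, heq, List.countP_map]
  have hcongr : (PySem.List.pyRange 0 (n:Int)).countP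
        ((fun x => decide (x < pvG ps (k:Int))) ∘ pvG ps)
      = (PySem.List.pyRange 0 (n:Int)).countP (fun m => decide (pvG ps m < pvG ps (k:Int))) := by
    apply List.countP_congr
    intro m _
    simp [Function.comp]
  rw [hcongr]
  omega

theorem pvBStepK_delta (ps : List (Int × Int)) (n : Nat) (x : Int × Int)
    (hx : 0 ≤ x.1 ∧ x.1 < (n:Int) ∧ 0 ≤ x.2 ∧ x.2 < (n:Int))
    (v : List Int) (hv : v.length = n)
    (hglen : (pvGidxF ps n).length = n)
    (hgent : ∀ k, k < n → (pvGidxF ps n)[k]! = pvG ps (k:Int)) :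
    (pvBStepK (PySem.Dict.counter ps) (pvGidxF ps n) v x).length = n ∧
      ∀ k, k < n → (pvBStepK (PySem.Dict.counter ps) (pvGidxF ps n) v x)[k]!
        = v[k]! + (if pvKeepB ps x then pvAdj ps (k:Int) (pvCanon x) else 0) := by
  obtain ⟨a, b⟩ := x
  obtain ⟨ha0, han, hb0, hbn⟩ := hx
  have hga : PySem.List.pyGetD (pvGidxF ps n) a 0 = pvG ps a := by
    rw [PySem.List.pyGetD_eq_getElem (pvGidxF ps n) (d := 0) ha0 (by rw [hglen]; exact han),
      ← getElem!_pos (pvGidxF ps n) a.toNat (by rw [hglen]; omega),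
      hgent a.toNat (by omega)]
    congr 1
    omega
  have hgb : PySem.List.pyGetD (pvGidxF ps n) b 0 = pvG ps b := by
    rw [PySem.List.pyGetD_eq_getElem (pvGidxF ps n) (d := 0) hb0 (by rw [hglen]; exact hbn),
      ← getElem!_pos (pvGidxF ps n) b.toNat (by rw [hglen]; omega),
      hgent b.toNat (by omega)]
    congr 1
    omega
  constructor
  · simp only [pvBStepK]
    split_ifs <;> simp [hv]
  · intro k hk
    have hkv : k < v.length := by omega
    simp only [pvBStepK]
    by_cases hkeep : pvKeepB ps (a, b)
    · have hguard : ¬ ((a == b || (decide (b < a) && (PySem.Dict.counter ps).contains (b, a))) = true) := by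
        rw [PySem.Dict.contains_counter]
        have h2 := (pvAdjKeep_iff ps (a, b)).mp hkeep
        intro hc
        simp only [Bool.or_eq_true, Bool.and_eq_true, beq_iff_eq, decide_eq_true_eq] at hc
        rcases hc with hc | ⟨hlt, hcc⟩
        · exact h2.1 hc
        · exact h2.2 ⟨hlt, List.contains_iff_mem.mp hcc⟩
      rw [if_neg hguard, if_pos hkeep]
      have hab_ne : ¬ a = b := ((pvAdjKeep_iff ps (a, b)).mp hkeep).1
      have hmemc : ∀ y : Int × Int, (PySem.Dict.counter ps).getD y 0 = (ps.count y : Int) :=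
        fun y => PySem.Dict.getD_counter ps y
      by_cases hlt : a < b
      · simp only [if_pos hlt]
        rw [hga, hgb, hmemc, hmemc]
        have hcanon : pvCanon (a, b) = (a, b) := by
          unfold pvCanon
          rw [if_pos hlt]
        rw [hcanon]
        simp only [pvAdj, pvGPick, pvC]
        split_ifs <;>
          (try rw [pvGetSub _ _ _ _ (by simpa using hkv)]) <;>
          (try rw [pvGetAdd _ _ _ _ hkv]) <;>
          (try split_ifs) <;>
          omega
      · simp only [if_neg hlt]
        rw [hga, hgb, hmemc, hmemc]
        have hcanon : pvCanon (a, b) = (b, a) := by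
          unfold pvCanon
          rw [if_neg hlt]
        rw [hcanon]
        simp only [pvAdj, pvGPick, pvC]
        split_ifs <;>
          (try rw [pvGetSub _ _ _ _ (by simpa using hkv)]) <;>
          (try rw [pvGetAdd _ _ _ _ hkv]) <;>
          (try split_ifs) <;>
          omega
    · have hkf : pvKeepB ps (a, b) = false := by
        revert hkeep
        cases pvKeepB ps (a, b) <;> simp
      have hguard : ((a == b || (decide (b < a) && (PySem.Dict.counter ps).contains (b, a))) = true) := by
        rw [PySem.Dict.contains_counter]
        have h := hkf
        rw [pvKeepB] at h
        cases hh : (a == b || (decide (b < a) && ps.contains (b, a)))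
        · rw [hh] at h
          simp at h
        · rfl
      rw [if_pos hguard, if_neg hkeep]
      simp

theorem pvB_eq_common (friends gifts : List String) (hpre : Pre_solution friends gifts) :
    solution_alt friends gifts = pvCommon friends gifts := by
  have hB : solution_alt friends gifts =
      (PySem.List.max? (((pvBSt (pvName friends) gifts friends.length).1).keys.foldl
          (pvBStepK (pvBSt (pvName friends) gifts friends.length).1
            (pvBSt (pvName friends) gifts friends.length).2)
          ((pvBSt (pvName friends) gifts friends.length).2.map
            (fun v => (pvBFirst (pvBSt (pvName friends) gifts friends.length).2).getD v 0)))
        (fun x => x)).getD 0 := rfl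
  have hC : pvCommon friends gifts =
      (PySem.List.max? ((PySem.List.pyRange 0 (friends.length : Int)).foldl (fun get i =>
          (PySem.List.pyRange (i+1) (friends.length : Int)).foldl
            (fun get j => pvStep (gifts.map (pvPOf (pvName friends))) i j get) get)
          (List.replicate friends.length 0)) (fun x => x)).getD 0 := rfl
  rw [hB, hC]
  set n := friends.length with hn
  set name := pvName friends with hname
  set ps := gifts.map (pvPOf name) with hps
  have hpsR : ∀ p ∈ ps, 0 ≤ p.1 ∧ p.1 < (n : Int) ∧ 0 ≤ p.2 ∧ p.2 < (n : Int) := by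
    have := pvPs_range friends gifts hpre
    simpa [pvPs, ← hname, ← hps, ← hn] using this
  have hst : pvBSt name gifts n = (PySem.Dict.counter ps, pvGidxF ps n) := by
    unfold pvBSt
    rw [pvBSt_split name gifts]
    simp only [Prod.mk.injEq]
    constructor
    · rw [← PySem.Dict.foldl_insert_getD_add_one_eq_counter, hps, List.foldl_map]
    · rw [pvGidxF, hps, List.foldl_map]
  rw [hst]
  have hG := pvGidxF_spec ps n hpsR
  have hW0 := pvWins0_spec ps n (pvGidxF ps n) hG.1 hG.2
  have hKfold := pvFoldDelta (pvBStepK (PySem.Dict.counter ps) (pvGidxF ps n))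
      (fun x k => if pvKeepB ps x then pvAdj ps (k:Int) (pvCanon x) else 0) n
      (PySem.Set.ofList ps)
      ((pvGidxF ps n).map (fun v => (pvBFirst (pvGidxF ps n)).getD v 0)) hW0.1
      (fun x hx v hv =>
        pvBStepK_delta ps n x (hpsR x ((PySem.Set.mem_ofList ps x).mp hx)) v hv hG.1 hG.2)
  have hAfold := pvFoldDelta (fun get p => pvStep ps p.1 p.2 get)
      (fun p k => pvDelta ps (k:Int) p) n (pvAllPairs n) (List.replicate n 0) (by simp)
      (by
        intro p hp v hv
        obtain ⟨h1, h2, h3⟩ := (pvMem_allPairs n p).mp hp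
        exact pvStep_delta ps n p.1 p.2 ⟨h1, by omega⟩ ⟨by omega, h3⟩ v hv)
  have hkeys : (PySem.Dict.counter ps).keys = PySem.Set.ofList ps := PySem.Dict.keys_counter ps
  have hflat : (pvAllPairs n).foldl (fun get p => pvStep ps p.1 p.2 get) (List.replicate n 0)
      = (PySem.List.pyRange 0 (n:Int)).foldl (fun get i =>
          (PySem.List.pyRange (i+1) (n:Int)).foldl (fun get j => pvStep ps i j get) get)
          (List.replicate n 0) := by
    unfold pvAllPairs
    rw [List.foldl_flatMap]
    simp only [List.foldl_map]
  have hlist : (PySem.Set.ofList ps).foldl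
        (pvBStepK (PySem.Dict.counter ps) (pvGidxF ps n))
        ((pvGidxF ps n).map (fun v => (pvBFirst (pvGidxF ps n)).getD v 0))
      = (pvAllPairs n).foldl (fun get p => pvStep ps p.1 p.2 get) (List.replicate n 0) := by
    apply List.ext_getElem (by rw [hKfold.1, hAfold.1])
    intro q h1 h2
    have hq : q < n := by
      rw [← hKfold.1]
      simpa using h1
    rw [← getElem!_pos ((PySem.Set.ofList ps).foldl
          (pvBStepK (PySem.Dict.counter ps) (pvGidxF ps n))
          ((pvGidxF ps n).map (fun v => (pvBFirst (pvGidxF ps n)).getD v 0))) q h1,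
        ← getElem!_pos ((pvAllPairs n).foldl (fun get p => pvStep ps p.1 p.2 get)
          (List.replicate n 0)) q h2,
        hKfold.2 q hq, hAfold.2 q hq]
    rw [hW0.2 q hq]
    have hrep : (List.replicate n (0:Int))[q]! = 0 := by
      rw [getElem!_pos (List.replicate n (0:Int)) q (by simp [hq])]
      simp
    rw [hrep]
    have hdsplit : ((pvAllPairs n).map (fun p => pvDelta ps (q:Int) p)).sum
        = ((pvAllPairs n).map (fun p => pvGPick ps (q:Int) p.1 p.2)).sum
          + ((pvAllPairs n).map (pvAdj ps (q:Int))).sum := by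
      rw [← PySem.List.sum_map_add_int]
      apply congrArg List.sum
      apply List.map_congr_left
      intro p _
      exact pvDelta_split ps (q:Int) p
    rw [hdsplit, pvGPick_sum ps n (q:Int) ⟨by omega, by omega⟩, pvAdj_sum ps n (q:Int) hpsR]
    rw [pvSumFilter (PySem.Set.ofList ps) (pvKeepB ps) (fun x => pvAdj ps (q:Int) (pvCanon x))]
    rw [List.map_map]
    simp only [Function.comp_def]
    omega
  rw [hkeys, hlist, hflat]

-- ===== VERDICT (by name: the statement is the Claim_ definition above) =====
theorem solution_spec : Claim_equal_solution := by
  intro friends gifts _ hpre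
  unfold Spec_solution
  rw [pvA_eq_common friends gifts hpre, pvB_eq_common friends gifts hpre]
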